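-- pv_equiv track=rewrite | github.com/christofmuc/KnobKraft-orm | adaptations/Elektron_AnalogRytm.py | unescapeSysexElektron
-- ===== SOURCE A (Python) =====
-- from typing import Optional, List, Tuple
--
-- def unescapeSysexElektron(sysex: List[int]) -> Tuple[List[int], int]:
--     result = []
--     chksum = 0
--     data_index = 0
--
--     while data_index < len(sysex):
--         msbits = sysex[data_index]
--         chksum += msbits
--         data_index += 1
--
--         for i in range(7):
--             if data_index < len(sysex):
--                 byte = sysex[data_index] | ((msbits & (1 << i)) << (7 - i))
--                 result.append(byte)
--                 chksum += sysex[data_index]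
--                 data_index += 1
--     return result, chksum
-- ===== SOURCE B (Python) =====
-- def unescapeSysexElektron(sysex):
--     # Single flat pass: checksum is just the sum of all consumed bytes, and the
--     # position mod 8 tells whether a byte is an MSB carrier or a data byte.
--     chksum = sum(sysex)
--     result = []
--     msbits = 0
--     for pos, b in enumerate(sysex):
--         r = pos % 8
--         if r == 0:
--             msbits = b
--         else:
--             i = r - 1
--             result.append(b | ((msbits & (1 << i)) << (7 - i)))
--     return result, chksum
-- ===== Notes on version B (the rewrite author's own statement) =====
-- stated objective: simpler
-- what changed: Replaces A's nested while/for with interleaved index bookkeeping by one flat enumerate pass keyed on pos % 8 (MSB carrier vs data byte), with the checksum computed independently as sum(sysex).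
import Mathlib
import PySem

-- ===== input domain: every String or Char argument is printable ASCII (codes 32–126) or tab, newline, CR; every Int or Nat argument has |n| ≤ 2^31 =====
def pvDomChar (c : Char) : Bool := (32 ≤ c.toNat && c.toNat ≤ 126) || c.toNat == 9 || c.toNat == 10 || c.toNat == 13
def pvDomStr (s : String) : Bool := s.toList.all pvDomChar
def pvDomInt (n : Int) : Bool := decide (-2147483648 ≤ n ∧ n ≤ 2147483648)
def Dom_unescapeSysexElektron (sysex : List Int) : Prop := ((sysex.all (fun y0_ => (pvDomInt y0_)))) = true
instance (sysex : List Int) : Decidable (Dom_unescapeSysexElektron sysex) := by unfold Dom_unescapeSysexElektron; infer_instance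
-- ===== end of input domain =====

-- B: one flat enumerate pass keyed on pos % 8 with checksum computed separately as sum(sysex); same complexity, simpler shape.
-- ===== PORT A =====
-- A's while loop with the inner 'for i in range(7)' guarded by 'data_index < len(sysex)'
-- becomes structural recursion over the remaining list; the state is 'none' (the outer
-- loop is about to read an MSB byte) or 'some (msbits, i)' (the inner loop at bit i).
def aGo : List Int → Option (Int × Nat) → List Int → Int → List Int × Int
  | [], _, result, chksum => (result, chksum)
  | x :: rest, none, result, chksum => aGo rest (some (x, 0)) result (chksum + x)
  | x :: rest, some (msbits, i), result, chksum =>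
      let byte := PySem.Int.bor x ((PySem.Int.band msbits ((1 : Int) <<< i)) <<< (7 - i))
      aGo rest (if i + 1 < 7 then some (msbits, i + 1) else none) (result ++ [byte]) (chksum + x)

def unescapeSysexElektron (sysex : List Int) : List Int × Int :=
  aGo sysex none [] 0

-- ===== PORT B =====
-- loop body of B's single 'for pos, b in enumerate(sysex)' pass; state = (msbits, result)
def altBody (st : Int × List Int) (p : Int × Int) : Int × List Int :=
  let r := (p.1 % 8).toNat
  if r = 0 then (p.2, st.2)
  else
    let i := r - 1
    (st.1, st.2 ++ [PySem.Int.bor p.2 ((PySem.Int.band st.1 ((1 : Int) <<< i)) <<< (7 - i))])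

def unescapeSysexElektron_alt (sysex : List Int) : List Int × Int :=
  let chksum := sysex.foldl (· + ·) 0
  let st := (PySem.List.enumerate sysex 0).foldl altBody ((0 : Int), ([] : List Int))
  (st.2, chksum)

-- ===== PRECONDITION & SPEC =====
def Spec_unescapeSysexElektron (sysex : List Int) (out : List Int × Int) : Prop := out = unescapeSysexElektron_alt sysex
instance (sysex : List Int) (out : List Int × Int) : Decidable (Spec_unescapeSysexElektron sysex out) := by unfold Spec_unescapeSysexElektron; infer_instance

-- ===== CLAIM (what is proved, stated in full; the proofs are below) =====
def Claim_equal_unescapeSysexElektron : Prop := ∀ (sysex : List Int), Dom_unescapeSysexElektron sysex → Spec_unescapeSysexElektron sysex (unescapeSysexElektron sysex)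

-- ===== LEMMAS AND PROOFS =====

-- the loop invariant tying A's control state to B's position counter
def AInv (st : Option (Int × Nat)) (pos m : Int) : Prop :=
  match st with
  | none => pos % 8 = 0
  | some (mb, i) => pos % 8 = (i : Int) + 1 ∧ mb = m ∧ i < 7

lemma foldl_add_sum (xs : List Int) : ∀ c : Int, xs.foldl (· + ·) c = c + xs.sum := by
  induction xs with
  | nil => simp
  | cons x rest ih => intro c; simp [List.foldl_cons, ih, add_assoc]

lemma key (xs : List Int) : ∀ (pos m : Int) (st : Option (Int × Nat))
    (result : List Int) (chksum : Int), 0 ≤ pos → AInv st pos m →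
    aGo xs st result chksum
      = (((PySem.List.enumerate xs pos).foldl altBody (m, result)).2, chksum + xs.sum) := by
  induction xs with
  | nil =>
      intro pos m st result chksum hpos hinv
      cases st <;> simp [aGo, PySem.List.enumerate_nil]
  | cons x rest ih =>
      intro pos m st result chksum hpos hinv
      rw [PySem.List.enumerate_cons, List.foldl_cons]
      cases st with
      | none =>
          have hr : (pos % 8).toNat = 0 := by unfold AInv at hinv; omega
          have hb : altBody (m, result) (pos, x) = (x, result) := by
            simp [altBody, hr]
          rw [hb, aGo, ih (pos + 1) x (some (x, 0)) result (chksum + x) (by omega)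
                (by unfold AInv at hinv ⊢; omega)]
          simp [List.sum_cons]; ring
      | some mi =>
          obtain ⟨mb, i⟩ := mi
          obtain ⟨h1, h2, h3⟩ := hinv
          have hr : (pos % 8).toNat = i + 1 := by omega
          have hb : altBody (m, result) (pos, x)
              = (m, result ++ [PySem.Int.bor x ((PySem.Int.band m ((1 : Int) <<< i)) <<< (7 - i))]) := by
            simp [altBody, hr]
          subst h2
          have hinv' : AInv (if i + 1 < 7 then some (mb, i + 1) else none) (pos + 1) mb := by
            unfold AInv
            split_ifs with h
            · exact ⟨by push_cast; omega, rfl, by omega⟩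
            · show (pos + 1) % 8 = 0
              omega
          rw [hb, aGo, ih (pos + 1) mb _ _ _ (by omega) hinv']
          simp [List.sum_cons, add_assoc]

-- ===== VERDICT (by name: the statement is the Claim_ definition above) =====
theorem unescapeSysexElektron_spec : Claim_equal_unescapeSysexElektron := by
  intro sysex _
  unfold Spec_unescapeSysexElektron unescapeSysexElektron unescapeSysexElektron_alt
  rw [key sysex 0 0 none [] 0 le_rfl (by unfold AInv; simp)]
  simp [foldl_add_sum]
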